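-- pv_equiv track=rewrite | github.com/bstriner/graph-lm | graph_lm/tree_vis.py | set_subtree
-- ===== SOURCE A (Python) =====
-- import itertools
--
-- def set_subtree(layers, subtree, i_val, j_val):
--     js = [j_val]
--     ks = [0]
--     for i in range(i_val, i_val + len(subtree)):
--         for j, k in zip(js, ks):
--             layers[i][j] = subtree[i - i_val][k]
--         js = list(itertools.chain.from_iterable([j * 2, (j * 2) + 1] for j in js))
--         ks = list(itertools.chain.from_iterable([k * 2, (k * 2) + 1] for k in ks))
--     return layers
-- ===== SOURCE B (Python) =====
-- def set_subtree(layers, subtree, i_val, j_val):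
--     for d, row in enumerate(subtree):
--         width = 2 ** d
--         base = j_val * width
--         tgt = layers[i_val + d]
--         for k in range(width):
--             tgt[base + k] = row[k]
--     return layers
-- ===== Notes on version B (the rewrite author's own statement) =====
-- stated objective: simpler
-- what changed: B drops A's js/ks index lists and their itertools.chain doubling entirely: at depth d the column indices are computed arithmetically as j_val*2**d + k for k in range(2**d), written directly into the fetched target row.
import Mathlib
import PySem

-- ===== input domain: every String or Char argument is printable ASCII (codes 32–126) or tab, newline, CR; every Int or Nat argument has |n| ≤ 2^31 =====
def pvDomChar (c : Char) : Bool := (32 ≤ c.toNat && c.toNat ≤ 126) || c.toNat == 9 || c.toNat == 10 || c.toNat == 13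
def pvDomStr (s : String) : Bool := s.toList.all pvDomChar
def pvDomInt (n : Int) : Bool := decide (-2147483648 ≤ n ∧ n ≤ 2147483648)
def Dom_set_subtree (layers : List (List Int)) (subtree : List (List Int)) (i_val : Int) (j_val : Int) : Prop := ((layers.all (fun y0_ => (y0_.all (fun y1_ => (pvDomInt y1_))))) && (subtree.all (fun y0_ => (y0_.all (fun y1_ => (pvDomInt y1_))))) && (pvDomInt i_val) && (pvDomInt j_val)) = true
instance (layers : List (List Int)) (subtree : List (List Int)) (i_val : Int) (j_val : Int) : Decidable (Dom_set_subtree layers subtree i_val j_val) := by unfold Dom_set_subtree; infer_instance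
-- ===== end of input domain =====

-- B replaces A's js/ks index lists and their itertools.chain doubling by direct arithmetic
-- (column = j_val*2^d + k for k < 2^d); both Pythons mutate `layers` in place the same way,
-- the theorem is about the returned value.


-- ===== PORT A =====
def set_subtree (layers : List (List Int)) (subtree : List (List Int)) (i_val : Int) (j_val : Int) : List (List Int) :=
  ((PySem.List.pyRange i_val (i_val + PySem.List.len subtree) 1).foldl
    (fun st i =>
      ( (st.2.1.zip st.2.2).foldl
          (fun lay jk =>
            PySem.List.pySetD lay i
              (PySem.List.pySetD (PySem.List.pyGetD lay i [])
                jk.1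
                (PySem.List.pyGetD (PySem.List.pyGetD subtree (i - i_val) []) jk.2 0)))
          st.1,
        st.2.1.flatMap (fun j => [j * 2, j * 2 + 1]),
        st.2.2.flatMap (fun k => [k * 2, k * 2 + 1]) ))
    (layers, [j_val], ([0] : List Int))).1

-- ===== PORT B =====
def set_subtree_alt (layers : List (List Int)) (subtree : List (List Int)) (i_val : Int) (j_val : Int) : List (List Int) :=
  (PySem.List.enumerate subtree 0).foldl
    (fun lay dr =>
      let width : Nat := 2 ^ dr.1.toNat
      let base : Int := j_val * (width : Int)
      PySem.List.pySetD lay (i_val + dr.1)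
        ((List.range width).foldl
          (fun t (k : Nat) => PySem.List.pySetD t (base + (k : Int)) (PySem.List.pyGetD dr.2 (k : Int) 0))
          (PySem.List.pyGetD lay (i_val + dr.1) [])))
    layers

-- ===== PRECONDITION & SPEC =====
-- Pre_ = exactly the inputs where the Python A raises no IndexError: every touched layer row
-- exists (Python wraparound allowed), every subtree row is wide enough, every written column in range.
def Pre_set_subtree (layers : List (List Int)) (subtree : List (List Int)) (i_val : Int) (j_val : Int) : Prop :=
  ∀ d : Nat, d < subtree.length →
    PySem.Raise.InRange layers.length (i_val + (d : Int)) ∧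
    2 ^ d ≤ (subtree.getD d []).length ∧
    ∀ k : Nat, k < 2 ^ d →
      PySem.Raise.InRange (PySem.List.pyGetD layers (i_val + (d : Int)) []).length
        (j_val * 2 ^ d + (k : Int))
instance (layers : List (List Int)) (subtree : List (List Int)) (i_val : Int) (j_val : Int) : Decidable (Pre_set_subtree layers subtree i_val j_val) := by
  unfold Pre_set_subtree PySem.Raise.InRange; infer_instance

def pvWitness_set_subtree : List (List Int) × List (List Int) × Int × Int :=
  ([[0, 0], [0, 0, 0, 0]], [[5], [6, 7]], 0, 0)

def Spec_set_subtree (layers : List (List Int)) (subtree : List (List Int)) (i_val : Int) (j_val : Int) (out : List (List Int)) : Prop := out = set_subtree_alt layers subtree i_val j_val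
instance (layers : List (List Int)) (subtree : List (List Int)) (i_val : Int) (j_val : Int) (out : List (List Int)) : Decidable (Spec_set_subtree layers subtree i_val j_val out) := by unfold Spec_set_subtree; infer_instance

-- ===== CLAIM (what is proved, stated in full; the proofs are below) =====
def Claim_equal_set_subtree : Prop := ∀ (layers : List (List Int)) (subtree : List (List Int)) (i_val : Int) (j_val : Int), Dom_set_subtree layers subtree i_val j_val → Pre_set_subtree layers subtree i_val j_val → Spec_set_subtree layers subtree i_val j_val (set_subtree layers subtree i_val j_val)

-- ===== LEMMAS AND PROOFS =====

-- basic facts about python get/set at one (possibly negative) index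
theorem pv_idx_lt {n : Nat} {i : Int} {k : Nat} (h : PySem.List.pyIdx? n i = some k) : k < n := by
  unfold PySem.List.pyIdx? at h
  split_ifs at h <;> simp_all <;> omega

theorem pv_setD_some {α : Type} {xs : List α} {i : Int} {k : Nat} (v : α)
    (h : PySem.List.pyIdx? xs.length i = some k) : PySem.List.pySetD xs i v = xs.set k v := by
  simp [PySem.List.pySetD, PySem.List.pySet?, h]

theorem pv_getD_some {α : Type} {xs : List α} {i : Int} {k : Nat} (d : α)
    (h : PySem.List.pyIdx? xs.length i = some k) :
    PySem.List.pyGetD xs i d = xs[k]?.getD d := by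
  simp [PySem.List.pyGetD, PySem.List.pyGet?, h]

theorem pv_setD_none {α : Type} {xs : List α} {i : Int} (v : α)
    (h : PySem.List.pyIdx? xs.length i = none) : PySem.List.pySetD xs i v = xs := by
  simp [PySem.List.pySetD, PySem.List.pySet?, h]

theorem pv_idx_setD {α : Type} (xs : List α) (i j : Int) (v : α) :
    PySem.List.pyIdx? (PySem.List.pySetD xs i v).length j = PySem.List.pyIdx? xs.length j := by
  rw [PySem.List.length_pySetD]

theorem pv_setD_getD_self {α : Type} (xs : List α) (i : Int) (d : α) :
    PySem.List.pySetD xs i (PySem.List.pyGetD xs i d) = xs := by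
  cases h : PySem.List.pyIdx? xs.length i with
  | none => exact pv_setD_none _ h
  | some k =>
    have hk := pv_idx_lt h
    rw [pv_getD_some d h, pv_setD_some _ h, List.getElem?_eq_getElem hk]
    simp

theorem pv_getD_setD_same {α : Type} (xs : List α) (i : Int) (v : α) (d : α)
    {k : Nat} (h : PySem.List.pyIdx? xs.length i = some k) :
    PySem.List.pyGetD (PySem.List.pySetD xs i v) i d = v := by
  have hk := pv_idx_lt h
  rw [pv_getD_some d (by rw [pv_idx_setD]; exact h), pv_setD_some v h]
  simp [hk]

theorem pv_setD_setD_same {α : Type} (xs : List α) (i : Int) (a b : α) :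
    PySem.List.pySetD (PySem.List.pySetD xs i a) i b = PySem.List.pySetD xs i b := by
  cases h : PySem.List.pyIdx? xs.length i with
  | none => rw [pv_setD_none a h, pv_setD_none b h]
  | some k =>
    rw [pv_setD_some a h, pv_setD_some b h,
      pv_setD_some b (by rw [show (xs.set k a).length = xs.length by simp]; exact h),
      List.set_set]

-- a loop that rewrites one slot of the outer list over and over collapses to a single write-back
theorem pv_collapse {β : Type} (g : List Int → β → List Int) (i : Int) (ns : List β) :
    ∀ lay : List (List Int),
      ns.foldl (fun l k => PySem.List.pySetD l i (g (PySem.List.pyGetD l i []) k)) lay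
        = PySem.List.pySetD lay i (ns.foldl g (PySem.List.pyGetD lay i [])) := by
  induction ns with
  | nil => intro lay; simp only [List.foldl_nil]; exact (pv_setD_getD_self lay i []).symm
  | cons k ns ih =>
    intro lay
    simp only [List.foldl_cons]
    rw [ih]
    cases h : PySem.List.pyIdx? lay.length i with
    | none =>
      have hs : ∀ v : List Int, PySem.List.pySetD lay i v = lay := fun v => pv_setD_none v h
      simp only [hs]
    | some m =>
      rw [pv_getD_setD_same lay i _ [] h, pv_setD_setD_same]

-- doubling of an index list [a, a+1, …, a+m-1] gives [2a, …, 2a+2m-1]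
theorem pv_dbl (a : Int) (m : Nat) :
    ((List.range m).map (fun k : Nat => a + (k : Int))).flatMap (fun j => [j * 2, j * 2 + 1])
      = (List.range (2 * m)).map (fun k : Nat => a * 2 + (k : Int)) := by
  induction m with
  | zero => simp
  | succ m ih =>
    rw [List.range_succ, List.map_append, List.flatMap_append, ih,
      show 2 * (m + 1) = (2 * m + 1) + 1 by ring, List.range_succ, List.range_succ]
    simp only [List.map_append, List.append_assoc, List.flatMap_cons, List.flatMap_nil,
      List.map_cons, List.map_nil, List.append_nil]
    congr 1
    push_cast
    ring_nf
    simp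

theorem pv_dbl0 (m : Nat) :
    ((List.range m).map (fun k : Nat => (k : Int))).flatMap (fun j => [j * 2, j * 2 + 1])
      = (List.range (2 * m)).map (fun k : Nat => (k : Int)) := by
  have := pv_dbl 0 m
  simpa using this

-- the main loop invariant: after n outer iterations the A-state is B's partial fold plus
-- the arithmetic index lists for depth n
theorem pv_inv (subtree : List (List Int)) (i_val j_val : Int) (lay : List (List Int)) (n : Nat) :
    (List.range n).foldl
      (fun st (d : Nat) =>
        ( (st.2.1.zip st.2.2).foldl
            (fun l (jk : Int × Int) =>
              PySem.List.pySetD l (i_val + (d : Int))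
                (PySem.List.pySetD (PySem.List.pyGetD l (i_val + (d : Int)) [])
                  jk.1
                  (PySem.List.pyGetD
                    (PySem.List.pyGetD subtree ((i_val + (d : Int)) - i_val) []) jk.2 0)))
            st.1,
          st.2.1.flatMap (fun j => [j * 2, j * 2 + 1]),
          st.2.2.flatMap (fun k => [k * 2, k * 2 + 1]) ))
      (lay, [j_val], ([0] : List Int))
    = ((List.range n).foldl
        (fun l (d : Nat) =>
          PySem.List.pySetD l (i_val + (d : Int))
            ((List.range (2 ^ d)).foldl
              (fun t (k : Nat) =>
                PySem.List.pySetD t (j_val * 2 ^ d + (k : Int))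
                  (PySem.List.pyGetD (subtree.getD d []) (k : Int) 0))
              (PySem.List.pyGetD l (i_val + (d : Int)) [])))
        lay,
       (List.range (2 ^ n)).map (fun k : Nat => j_val * 2 ^ n + (k : Int)),
       (List.range (2 ^ n)).map (fun k : Nat => (k : Int))) := by
  induction n with
  | zero => simp
  | succ n ih =>
    rw [List.range_succ, List.foldl_append, List.foldl_append, ih]
    simp only [List.foldl_cons, List.foldl_nil]
    refine Prod.ext ?_ (Prod.ext ?_ ?_)
    · -- first component: the inner writes agree
      show ((((List.range (2 ^ n)).map fun k : Nat => j_val * 2 ^ n + (k : Int)).zip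
              ((List.range (2 ^ n)).map fun k : Nat => (k : Int))).foldl _ _) = _
      rw [List.zip_map', List.foldl_map]
      have harg : (i_val + (n : Int)) - i_val = ((n : Int)) := by ring
      rw [pv_collapse (fun t (k : Nat) =>
            PySem.List.pySetD t (j_val * 2 ^ n + (k : Int))
              (PySem.List.pyGetD (PySem.List.pyGetD subtree ((i_val + (n : Int)) - i_val) [])
                (k : Int) 0))
          (i_val + (n : Int)) (List.range (2 ^ n))]
      simp [harg]
    · -- second component: js doubles
      show ((List.range (2 ^ n)).map fun k : Nat => j_val * 2 ^ n + (k : Int)).flatMap _ = _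
      rw [pv_dbl (j_val * 2 ^ n) (2 ^ n)]
      rw [show 2 * 2 ^ n = 2 ^ (n + 1) by ring]
      congr 1
      funext k
      ring
    · -- third component: ks doubles
      show ((List.range (2 ^ n)).map fun k : Nat => (k : Int)).flatMap _ = _
      rw [pv_dbl0 (2 ^ n), show 2 * 2 ^ n = 2 ^ (n + 1) by ring]

-- ===== VERDICT (by name: the statement is the Claim_ definition above) =====
theorem set_subtree_spec : Claim_equal_set_subtree := by
  intro layers subtree i_val j_val _ _
  show set_subtree layers subtree i_val j_val = set_subtree_alt layers subtree i_val j_val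
  unfold set_subtree set_subtree_alt
  rw [PySem.List.enumerate_eq_map_pyRange (d := [])]
  simp only [PySem.List.len_eq, PySem.List.pyRange_one]
  rw [show ((i_val + (subtree.length : Int)) - i_val).toNat = subtree.length by omega,
      show ((subtree.length : Int) - 0).toNat = subtree.length by omega]
  simp only [List.foldl_map, zero_add, PySem.List.pyGetD_natCast, Int.toNat_natCast]
  rw [pv_inv subtree i_val j_val layers subtree.length]
  simp
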